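-- pv_equiv track=rewrite | github.com/Thomkraft/Projet_C_1ere_annee | SAE_1_02_Algo/Algo_recherche/Recherche.py | nbocc
-- ===== SOURCE A (Python) =====
-- def nbocc(tab:[int],e:int):
--     compteur = 0
--     i=0
--     nb=0
--     compteur = compteur + 2
--     while i < len(tab):
--         compteur = compteur + 1
--         if e==tab[i]:
--             nb = nb + 1
--             compteur = compteur + 2
--         i=i+1
--         compteur = compteur + 3
--     return compteur
-- ===== SOURCE B (Python) =====
-- def nbocc(tab:[int], e:int):
--     return 2 + 4*len(tab) + 2*tab.count(e)
-- ===== Notes on version B (the rewrite author's own statement) =====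
-- stated objective: simpler
-- what changed: Replaces the while-loop that accumulates a running step counter with the closed-form 2 + 4*len(tab) + 2*tab.count(e) derived from the loop invariant.
import Mathlib
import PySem

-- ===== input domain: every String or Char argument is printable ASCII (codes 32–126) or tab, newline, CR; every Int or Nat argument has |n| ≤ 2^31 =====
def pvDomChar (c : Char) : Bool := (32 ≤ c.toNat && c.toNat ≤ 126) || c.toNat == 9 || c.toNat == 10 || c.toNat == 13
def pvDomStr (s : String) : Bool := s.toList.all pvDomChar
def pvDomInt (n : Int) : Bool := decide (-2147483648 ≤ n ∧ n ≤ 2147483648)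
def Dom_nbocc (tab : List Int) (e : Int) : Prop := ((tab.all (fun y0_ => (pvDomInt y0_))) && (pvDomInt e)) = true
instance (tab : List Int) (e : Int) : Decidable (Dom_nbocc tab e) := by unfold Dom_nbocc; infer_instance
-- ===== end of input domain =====

-- B replaces A's while-loop accumulating a step counter by the closed form 2 + 4*len + 2*count (objective: simpler).

-- ===== PORT A =====
-- the while loop: state (compteur, nb), one step per list element (i advances once per iteration)
def nboccLoop (e : Int) : List Int → Int → Int → Int
  | [], compteur, _nb => compteur
  | x :: rest, compteur, nb =>
    let compteur := compteur + 1
    if e = x then nboccLoop e rest (compteur + 2 + 3) (nb + 1)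
    else nboccLoop e rest (compteur + 3) nb

def nbocc (tab : List Int) (e : Int) : Int := nboccLoop e tab (0 + 2) 0

-- ===== PORT B =====
def nbocc_alt (tab : List Int) (e : Int) : Int :=
  2 + 4 * (tab.length : Int) + 2 * (PySem.List.count tab e : Int)

-- ===== PRECONDITION & SPEC =====
def Spec_nbocc (tab : List Int) (e : Int) (out : Int) : Prop := out = nbocc_alt tab e
instance (tab : List Int) (e : Int) (out : Int) : Decidable (Spec_nbocc tab e out) := by unfold Spec_nbocc; infer_instance

-- ===== CLAIM (what is proved, stated in full; the proofs are below) =====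
def Claim_equal_nbocc : Prop := ∀ (tab : List Int) (e : Int), Dom_nbocc tab e → Spec_nbocc tab e (nbocc tab e)

-- ===== LEMMAS AND PROOFS =====
theorem nboccLoop_closed (e : Int) (tab : List Int) (c nb : Int) :
    nboccLoop e tab c nb = c + 4 * (tab.length : Int) + 2 * (tab.count e : Int) := by
  induction tab generalizing c nb with
  | nil => simp [nboccLoop]
  | cons x rest ih =>
    by_cases h : e = x
    · simp only [nboccLoop, if_pos h, ih]
      rw [h, List.count_cons_self]
      push_cast [List.length_cons]
      ring
    · simp only [nboccLoop, if_neg h, ih]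
      rw [List.count_cons_of_ne (by exact fun hxe => h hxe.symm)]
      push_cast [List.length_cons]
      ring

-- ===== VERDICT (by name: the statement is the Claim_ definition above) =====
theorem nbocc_spec : Claim_equal_nbocc := by
  intro tab e _
  unfold Spec_nbocc nbocc nbocc_alt
  rw [nboccLoop_closed, PySem.List.count_eq]
  ring
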